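-- pv_equiv track=rewrite | github.com/nacruzvene/isonav | isonavScripts/binCor/chimeraGL.py | checkThingOnList
-- ===== SOURCE A (Python) =====
-- def getRotation(thing, x):
--     return thing[-x:] + thing[:-x]
--
-- def getAllRotList(thing):
--     allRotL=[]
--     for i in range(len(thing)):
--         rThing=getRotation(thing,i)
--         allRotL.append(rThing)
--     return allRotL
--
-- def checkThingOnList(thing,list2Check):
--     rotThingL=getAllRotList(thing)
--
--     for rThing in rotThingL:
--         if rThing in list2Check:
--             return False
--
--     #Now inverting the thing
--     invThing=thing[::-1]
--     rotIThingL=getAllRotList(invThing)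
--     for rIThing in rotIThingL:
--         if rIThing in list2Check:
--             return False
--
--     #If it made it all the way, then it made it to the list.
--     return True
-- ===== SOURCE B (Python) =====
-- def checkThingOnList(thing, list2Check):
--     # rotation test via "rotation <=> length-L window of the doubled sequence";
--     # scans list2Check once instead of generating all rotations up front.
--     L = len(thing)
--     if L == 0:
--         return True
--     d = thing + thing
--     r = thing[::-1]
--     rd = r + r
--     for e in list2Check:
--         if len(e) == L and (_is_window(e, d, L) or _is_window(e, rd, L)):
--             return False
--     return True
--
-- def _is_window(e, s, L):
--     return any(s[i:i+L] == e for i in range(L))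
-- ===== Notes on version B (the rewrite author's own statement) =====
-- stated objective: faster
-- what changed: Instead of materialising every rotation of thing and of its reverse (Theta(L^2) list building) and testing membership of each in list2Check, B iterates over list2Check once and tests each element of matching length as a length-L contiguous window of the doubled sequence thing+thing (or of the doubled reversed sequence).
import Mathlib
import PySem

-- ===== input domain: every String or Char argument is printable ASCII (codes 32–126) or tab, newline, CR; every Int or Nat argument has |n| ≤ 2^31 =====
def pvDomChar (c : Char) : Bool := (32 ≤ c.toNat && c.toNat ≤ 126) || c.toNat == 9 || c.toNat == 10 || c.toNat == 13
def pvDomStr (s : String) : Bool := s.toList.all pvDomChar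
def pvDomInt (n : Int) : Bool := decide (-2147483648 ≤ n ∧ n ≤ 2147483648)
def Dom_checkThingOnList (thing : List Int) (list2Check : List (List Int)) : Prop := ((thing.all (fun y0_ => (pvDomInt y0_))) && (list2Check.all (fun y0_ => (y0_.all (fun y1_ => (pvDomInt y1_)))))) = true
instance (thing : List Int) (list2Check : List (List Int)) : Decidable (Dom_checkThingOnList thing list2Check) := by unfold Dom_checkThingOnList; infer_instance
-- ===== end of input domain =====

-- B replaces "generate all rotations of thing and of its reverse, test each for membership"
-- by one pass over list2Check testing each element as a length-L window of the doubled sequence.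

-- ===== PORT A =====
-- thing[-x:] + thing[:-x]
def getRotation (thing : List Int) (x : Int) : List Int :=
  PySem.List.slice thing (some (-x)) none ++ PySem.List.slice thing none (some (-x))

-- for i in range(len(thing)): allRotL.append(getRotation(thing, i))
def getAllRotList (thing : List Int) : List (List Int) :=
  (PySem.List.pyRange 0 (thing.length : Int) 1).foldl
    (fun acc i => acc ++ [getRotation thing i]) []

def checkThingOnList (thing : List Int) (list2Check : List (List Int)) : Bool :=
  let rotThingL := getAllRotList thing
  -- for rThing in rotThingL: if rThing in list2Check: return False
  if rotThingL.any (fun r => list2Check.contains r) then false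
  else
    -- invThing = thing[::-1]  (slice? with step -1 never fails, getD is unreachable)
    let invThing := (PySem.List.slice? thing none none (-1)).getD []
    let rotIThingL := getAllRotList invThing
    if rotIThingL.any (fun r => list2Check.contains r) then false
    else true

-- ===== PORT B =====
-- any(s[i:i+L] == e for i in range(L))
def pvIsWindow (e s : List Int) (L : Nat) : Bool :=
  (PySem.List.pyRange 0 (L : Int) 1).any
    (fun i => PySem.List.slice s (some i) (some (i + (L : Int))) == e)

def checkThingOnList_alt (thing : List Int) (list2Check : List (List Int)) : Bool :=
  let L := thing.length
  if L == 0 then true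
  else
    let d := thing ++ thing
    let r := (PySem.List.slice? thing none none (-1)).getD []
    let rd := r ++ r
    if list2Check.any (fun e => e.length == L && (pvIsWindow e d L || pvIsWindow e rd L))
    then false else true

-- ===== PRECONDITION & SPEC =====
def Spec_checkThingOnList (thing : List Int) (list2Check : List (List Int)) (out : Bool) : Prop := out = checkThingOnList_alt thing list2Check
instance (thing : List Int) (list2Check : List (List Int)) (out : Bool) : Decidable (Spec_checkThingOnList thing list2Check out) := by unfold Spec_checkThingOnList; infer_instance

-- ===== CLAIM (what is proved, stated in full; the proofs are below) =====
def Claim_equal_checkThingOnList : Prop := ∀ (thing : List Int) (list2Check : List (List Int)), Dom_checkThingOnList thing list2Check → Spec_checkThingOnList thing list2Check (checkThingOnList thing list2Check)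

-- ===== LEMMAS AND PROOFS =====

-- rotation by j : drop j ++ take j
def pvRot (t : List Int) (j : Nat) : List Int := t.drop j ++ t.take j

theorem getAllRotList_eq_map (t : List Int) :
    getAllRotList t = (PySem.List.pyRange 0 (t.length : Int) 1).map (getRotation t) := by
  unfold getAllRotList
  rw [PySem.List.foldl_append_singleton_eq_map]
  simp

theorem getRotation_nat (t : List Int) (k : Nat) (hk : k < t.length) :
    getRotation t (k : Int) = pvRot t ((t.length - k) % t.length) := by
  unfold getRotation pvRot
  rcases Nat.eq_zero_or_pos k with h0 | hpos
  · subst h0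
    simp only [Nat.cast_zero, neg_zero, Nat.sub_zero, Nat.mod_self]
    rw [show (0:Int) = ((0:Nat):Int) from by simp]
    rw [PySem.List.slice_from_natCast, PySem.List.slice_to_natCast]
  · rw [show (-(k : Int)) = -((k : Int)) from rfl]
    rw [PySem.List.slice_from_neg_natCast t k hpos, PySem.List.slice_to_neg_natCast t k hpos]
    have : (t.length - k) % t.length = t.length - k := Nat.mod_eq_of_lt (by omega)
    rw [this]

theorem mem_getAllRotList (t : List Int) (r : List Int) :
    r ∈ getAllRotList t ↔ ∃ j, j < t.length ∧ r = pvRot t j := by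
  rw [getAllRotList_eq_map, List.mem_map]
  constructor
  · rintro ⟨i, hi, rfl⟩
    rw [PySem.List.mem_pyRange_one] at hi
    obtain ⟨h0, hL⟩ := hi
    lift i to Nat using h0 with k
    have hk : k < t.length := by exact_mod_cast hL
    refine ⟨(t.length - k) % t.length, Nat.mod_lt _ (by omega), ?_⟩
    rw [getRotation_nat t k hk]
  · rintro ⟨j, hj, rfl⟩
    rcases Nat.eq_zero_or_pos j with h0 | hpos
    · refine ⟨0, ?_, ?_⟩
      · rw [PySem.List.mem_pyRange_one]; constructor <;> omega
      · subst h0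
        have := getRotation_nat t 0 (by omega)
        simpa [Nat.mod_self] using this
    · refine ⟨((t.length - j : Nat) : Int), ?_, ?_⟩
      · rw [PySem.List.mem_pyRange_one]
        constructor
        · exact_mod_cast Nat.zero_le _
        · exact_mod_cast (by omega : t.length - j < t.length)
      · have hk : t.length - j < t.length := by omega
        rw [getRotation_nat t (t.length - j) hk]
        congr 1
        have : t.length - (t.length - j) = j := by omega
        rw [this, Nat.mod_eq_of_lt hj]

theorem window_eq_rot (t : List Int) (k : Nat) (hk : k < t.length) :
    PySem.List.slice (t ++ t) (some (k : Int)) (some ((k : Int) + (t.length : Int))) = pvRot t k := by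
  have hcast : ((k : Int) + (t.length : Int)) = (((k + t.length : Nat) : Nat) : Int) := by push_cast; ring
  rw [hcast, PySem.List.slice_natCast]
  have hsub : k + t.length - k = t.length := by omega
  rw [hsub, List.drop_append_of_le_length (le_of_lt hk), List.take_append]
  unfold pvRot
  congr 1
  · exact List.take_of_length_le (by simp)
  · congr 1
    simp only [List.length_drop]
    omega

theorem pvIsWindow_iff (t e : List Int) :
    pvIsWindow e (t ++ t) t.length = true ↔ ∃ j, j < t.length ∧ e = pvRot t j := by
  unfold pvIsWindow
  rw [List.any_eq_true]
  constructor
  · rintro ⟨i, hi, heq⟩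
    rw [PySem.List.mem_pyRange_one] at hi
    obtain ⟨h0, hL⟩ := hi
    lift i to Nat using h0 with k
    have hk : k < t.length := by exact_mod_cast hL
    refine ⟨k, hk, ?_⟩
    have := window_eq_rot t k hk
    rw [this] at heq
    exact (beq_iff_eq.mp heq).symm
  · rintro ⟨j, hj, rfl⟩
    refine ⟨(j : Int), ?_, ?_⟩
    · rw [PySem.List.mem_pyRange_one]
      exact ⟨Int.natCast_nonneg j, by exact_mod_cast hj⟩
    · rw [window_eq_rot t j hj]
      simp

theorem length_pvRot (t : List Int) (j : Nat) : (pvRot t j).length = t.length := by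
  unfold pvRot; simp; omega

-- e is a rotation of t (with t.length as the L parameter) iff the B-side test fires
theorem bTest_iff (t e : List Int) (tr : List Int) (htr : tr.length = t.length) :
    (e.length == t.length && (pvIsWindow e (t ++ t) t.length || pvIsWindow e (tr ++ tr) t.length)) = true
      ↔ (∃ j, j < t.length ∧ e = pvRot t j) ∨ (∃ j, j < tr.length ∧ e = pvRot tr j) := by
  rw [Bool.and_eq_true, Bool.or_eq_true, beq_iff_eq]
  constructor
  · rintro ⟨-, h | h⟩
    · exact Or.inl ((pvIsWindow_iff t e).mp h)
    · right
      have := (pvIsWindow_iff tr e).mp (by rw [htr]; exact h)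
      exact this
  · rintro (⟨j, hj, rfl⟩ | ⟨j, hj, rfl⟩)
    · exact ⟨length_pvRot t j, Or.inl ((pvIsWindow_iff t _).mpr ⟨j, hj, rfl⟩)⟩
    · refine ⟨by rw [length_pvRot, htr], Or.inr ?_⟩
      rw [← htr]
      exact (pvIsWindow_iff tr _).mpr ⟨j, hj, rfl⟩

theorem main_eq (thing : List Int) (list2Check : List (List Int)) :
    checkThingOnList thing list2Check = checkThingOnList_alt thing list2Check := by
  unfold checkThingOnList checkThingOnList_alt
  simp only [PySem.List.slice?_none_none_neg_one, Option.getD_some]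
  by_cases hL : thing.length = 0
  · rw [List.eq_nil_of_length_eq_zero hL]
    simp [getAllRotList, PySem.List.pyRange_one_eq_nil]
  · have hne : (thing.length == 0) = false := by simp [hL]
    rw [hne]
    simp only [Bool.false_eq_true, if_false]
    have key : (list2Check.any (fun e => e.length == thing.length
              && (pvIsWindow e (thing ++ thing) thing.length
                  || pvIsWindow e (thing.reverse ++ thing.reverse) thing.length)))
        = ((getAllRotList thing).any (fun r => list2Check.contains r)
              || (getAllRotList thing.reverse).any (fun r => list2Check.contains r)) := by
      rw [Bool.eq_iff_iff]
      simp only [Bool.or_eq_true, List.any_eq_true, List.contains_iff_mem]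
      constructor
      · rintro ⟨e, hmem, htest⟩
        rcases (bTest_iff thing e thing.reverse (by simp)).mp htest with h | h
        · exact Or.inl ⟨e, (mem_getAllRotList thing e).mpr h, hmem⟩
        · exact Or.inr ⟨e, (mem_getAllRotList thing.reverse e).mpr h, hmem⟩
      · rintro (⟨r, hr, hmem⟩ | ⟨r, hr, hmem⟩)
        · obtain ⟨j, hj, rfl⟩ := (mem_getAllRotList thing r).mp hr
          exact ⟨_, hmem, (bTest_iff thing _ thing.reverse (by simp)).mpr (Or.inl ⟨j, hj, rfl⟩)⟩
        · obtain ⟨j, hj, rfl⟩ := (mem_getAllRotList thing.reverse r).mp hr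
          exact ⟨_, hmem, (bTest_iff thing _ thing.reverse (by simp)).mpr (Or.inr ⟨j, hj, rfl⟩)⟩
    cases h1 : (getAllRotList thing).any (fun r => list2Check.contains r) <;>
      cases h2 : (getAllRotList thing.reverse).any (fun r => list2Check.contains r) <;>
      rw [h1, h2] at key <;>
      simp only [Bool.or_false, Bool.or_self, Bool.or_true] at key <;>
      simp [key]

-- ===== VERDICT (by name: the statement is the Claim_ definition above) =====
theorem checkThingOnList_spec : Claim_equal_checkThingOnList := by
  intro thing list2Check _
  unfold Spec_checkThingOnList
  exact main_eq thing list2Check
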